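-- pv_equiv track=rewrite | github.com/kapteyn-astro/kapteyn | kapteyn/positions.py | minmatch
-- ===== SOURCE A (Python) =====
-- def minmatch(userstr, mylist, case=0):
-- #--------------------------------------------------------------
--    """
--    Purpose:    Given a list 'mylist' with strings and a search string
--               'userstr', find a -minimal- match of this string in
--                the list.
--
--    Inputs:
--     userstr-   The string that we want to find in the list of strings
--      mylist-   A list of strings
--        case-   Case insensitive search for case=0 else search is
--                case sensitive.
--
--    Returns:    1) None if nothing could be matched
--                2) -1 if more than one elements match
--                3) >= 0 the index of the matched list element
--    """
-- #--------------------------------------------------------------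
--    indx = None
--    if case == 0:
--       ustr = userstr.upper()
--    else:
--       ustr = userstr
--    for j, tr in enumerate(mylist):
--       if case == 0:
--          liststr = tr.upper()
--       else:
--          liststr = tr
--       if ustr == liststr:
--          indx = j
--          break
--       i = liststr.find(ustr, 0, len(tr))
--       if i == 0:
--          if indx == None:
--             indx = j
--          else:
--             indx = -1
--    return indx
-- ===== SOURCE B (Python) =====
-- def minmatch(userstr, mylist, case=0):
--     # Two-pass decomposition: normalize case once, return the first exact match
--     # immediately, otherwise collect all prefix-match indices and decide.
--     if case == 0:
--         ustr = userstr.upper()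
--         cmp = [s.upper() for s in mylist]
--     else:
--         ustr = userstr
--         cmp = mylist
--     for j, s in enumerate(cmp):
--         if s == ustr:
--             return j
--     hits = [j for j, s in enumerate(cmp) if s.startswith(ustr)]
--     if not hits:
--         return None
--     return hits[0] if len(hits) == 1 else -1
-- ===== Notes on version B (the rewrite author's own statement) =====
-- stated objective: alternative
-- what changed: Replaces A's single stateful loop (indx sentinel mutated across iterations with an in-loop break) by a two-pass decomposition: normalize case once into a comparison list, first pass returns the first exact match immediately, second pass collects all prefix-match indices and maps their count to None / the index / -1.
import Mathlib
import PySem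

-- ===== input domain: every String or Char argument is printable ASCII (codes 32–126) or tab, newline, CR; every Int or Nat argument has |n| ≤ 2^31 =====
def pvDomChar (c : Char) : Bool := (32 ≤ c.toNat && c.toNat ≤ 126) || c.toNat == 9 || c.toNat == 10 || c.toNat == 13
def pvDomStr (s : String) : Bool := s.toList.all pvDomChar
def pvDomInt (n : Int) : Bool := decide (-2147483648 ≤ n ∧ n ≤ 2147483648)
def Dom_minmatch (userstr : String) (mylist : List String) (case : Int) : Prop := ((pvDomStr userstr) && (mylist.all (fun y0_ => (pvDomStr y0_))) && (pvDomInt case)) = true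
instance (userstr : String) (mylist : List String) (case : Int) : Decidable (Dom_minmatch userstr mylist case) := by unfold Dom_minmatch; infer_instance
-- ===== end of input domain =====

-- B replaces A's single stateful loop by a two-pass decomposition (first exact match, then
-- collected prefix-match indices); alternative structure, same cost, return value proved equal.


-- ===== PORT A =====
-- A's for-loop over enumerate(mylist) with mutable `indx` and a `break` on exact match.
def minmatchLoop (case : Int) (ustr : String) : List String → Int → Option Int → Option Int
  | [], _, indx => indx
  | tr :: rest, j, indx =>
    let liststr := if case = 0 then PySem.Str.upper tr else tr
    if ustr = liststr then some j
    else
      let i := PySem.Str.findFrom liststr ustr 0 (some (PySem.Str.len tr))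
      let indx' := if i = 0 then (if indx = none then some j else some (-1)) else indx
      minmatchLoop case ustr rest (j + 1) indx'

def minmatch (userstr : String) (mylist : List String) (case : Int) : Option Int :=
  let ustr := if case = 0 then PySem.Str.upper userstr else userstr
  minmatchLoop case ustr mylist 0 none

-- ===== PORT B =====
-- first pass of Source B: index of the first element equal to ustr
def firstEqIdx (ustr : String) : List String → Int → Option Int
  | [], _ => none
  | s :: rest, j => if s = ustr then some j else firstEqIdx ustr rest (j + 1)

-- second pass of Source B: all indices whose element has ustr as a prefix
def prefixIdxs (ustr : String) : List String → Int → List Int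
  | [], _ => []
  | s :: rest, j =>
    (if PySem.Str.startswith s ustr then [j] else []) ++ prefixIdxs ustr rest (j + 1)

def minmatch_alt (userstr : String) (mylist : List String) (case : Int) : Option Int :=
  let ustr := if case = 0 then PySem.Str.upper userstr else userstr
  let cmp := if case = 0 then mylist.map PySem.Str.upper else mylist
  match firstEqIdx ustr cmp 0 with
  | some j => some j
  | none =>
    match prefixIdxs ustr cmp 0 with
    | [] => none
    | [j] => some j
    | _ => some (-1)

-- ===== PRECONDITION & SPEC =====
def Spec_minmatch (userstr : String) (mylist : List String) (case : Int) (out : Option Int) : Prop := out = minmatch_alt userstr mylist case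
instance (userstr : String) (mylist : List String) (case : Int) (out : Option Int) : Decidable (Spec_minmatch userstr mylist case out) := by unfold Spec_minmatch; infer_instance

-- ===== CLAIM (what is proved, stated in full; the proofs are below) =====
def Claim_equal_minmatch : Prop := ∀ (userstr : String) (mylist : List String) (case : Int), Dom_minmatch userstr mylist case → Spec_minmatch userstr mylist case (minmatch userstr mylist case)

-- ===== LEMMAS AND PROOFS =====

-- how A's accumulated `indx` combines with the remaining prefix hits
def pvCombine (indx : Option Int) (hits : List Int) : Option Int :=
  match hits with
  | [] => indx
  | [k] => match indx with | none => some k | some _ => some (-1)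
  | _ => some (-1)

theorem chars_find_zero_iff (s sub : List Char) :
    PySem.Chars.find s sub = 0 ↔ sub <+: s := by
  constructor
  · intro h
    have h0 : 0 ≤ PySem.Chars.find s sub := le_of_eq h.symm
    have := (PySem.Chars.find_spec (s := s) (sub := sub) h0).1
    simpa [h] using this
  · intro hp
    have h0 : 0 ≤ PySem.Chars.find s sub := by
      rw [PySem.Chars.find_nonneg_iff]
      exact hp.isInfix
    by_contra hne
    have hpos : 0 < PySem.Chars.find s sub := lt_of_le_of_ne h0 (Ne.symm hne)
    have := (PySem.Chars.find_spec (s := s) (sub := sub) h0).2 0 (by omega)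
    simp at this
    exact this hp

theorem chars_findFrom_full (s sub : List Char) :
    PySem.Chars.findFrom s sub 0 (some (s.length : Int)) = PySem.Chars.find s sub := by
  have h : ¬ ((s.length : Int) < 0) := by omega
  simp [PySem.Chars.findFrom, h, List.take_length]
  exact fun h' => Eq.symm h'

theorem findFrom_full (s sub : String) :
    (PySem.Str.findFrom s sub 0 (some (PySem.Str.len s)) = 0) ↔
      PySem.Str.startswith s sub = true := by
  simp only [PySem.Str.findFrom_eq, PySem.Str.len_eq, PySem.Str.startswith_eq]
  rw [chars_findFrom_full, chars_find_zero_iff, PySem.Chars.startswith_iff]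

theorem pvCombine_cons (indx : Option Int) (j : Int) (hits : List Int) :
    pvCombine indx (j :: hits) =
      pvCombine (if indx = none then some j else some (-1)) hits := by
  cases indx <;> cases hits with
  | nil => simp [pvCombine]
  | cons k rest => cases rest <;> simp [pvCombine]

-- A's loop, run from state (j, indx), equals B's two-pass combination on the tail.
theorem loop_eq (case : Int) (ustr : String) (xs : List String) :
    ∀ (j : Int) (indx : Option Int),
      minmatchLoop case ustr xs j indx =
        match firstEqIdx ustr (if case = 0 then xs.map PySem.Str.upper else xs) j with
        | some k => some k
        | none => pvCombine indx (prefixIdxs ustr (if case = 0 then xs.map PySem.Str.upper else xs) j) := by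
  induction xs with
  | nil =>
    intro j indx
    by_cases hc : case = 0 <;> simp [hc, minmatchLoop, firstEqIdx, prefixIdxs, pvCombine]
  | cons x rest ih =>
    intro j indx
    set s := (if case = 0 then PySem.Str.upper x else x) with hs
    have hsplit : (if case = 0 then (x :: rest).map PySem.Str.upper else x :: rest)
        = s :: (if case = 0 then rest.map PySem.Str.upper else rest) := by
      by_cases hc : case = 0 <;> simp [hc, hs]
    have hlen : PySem.Str.len x = PySem.Str.len s := by
      by_cases hc : case = 0 <;> simp [hc, hs, PySem.Str.len_eq, PySem.Chars.upper]
    rw [hsplit]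
    simp only [minmatchLoop, firstEqIdx, prefixIdxs]
    rw [← hs]
    by_cases he : ustr = s
    · simp [he]
    · rw [if_neg he, if_neg fun h => he (Eq.symm h)]
      by_cases hp : PySem.Str.startswith s ustr = true
      · have hf : PySem.Str.findFrom s ustr 0 (some (PySem.Str.len x)) = 0 := by
          rw [hlen]; exact (findFrom_full s ustr).mpr hp
        rw [if_pos hf, if_pos hp, ih, List.singleton_append]
        cases firstEqIdx ustr (if case = 0 then rest.map PySem.Str.upper else rest) (j + 1) with
        | some k => rfl
        | none => exact (pvCombine_cons indx j _).symm
      · have hf : ¬ (PySem.Str.findFrom s ustr 0 (some (PySem.Str.len x)) = 0) := by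
          rw [hlen]; exact fun hz => hp ((findFrom_full s ustr).mp hz)
        rw [if_neg hf, if_neg hp, List.nil_append, ih]

-- ===== VERDICT (by name: the statement is the Claim_ definition above) =====
theorem minmatch_spec : Claim_equal_minmatch := by
  intro userstr mylist case _
  show minmatch userstr mylist case = minmatch_alt userstr mylist case
  simp only [minmatch, minmatch_alt]
  rw [loop_eq]
  cases hfe : firstEqIdx (if case = 0 then PySem.Str.upper userstr else userstr)
      (if case = 0 then mylist.map PySem.Str.upper else mylist) 0 with
  | some k => simp
  | none =>
    cases hts : prefixIdxs (if case = 0 then PySem.Str.upper userstr else userstr)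
        (if case = 0 then mylist.map PySem.Str.upper else mylist) 0 with
    | nil => simp [pvCombine]
    | cons a t => cases t <;> simp [pvCombine]
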